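-- pv_equiv track=rewrite | github.com/funnyaligator/movie-scraper | scraper.py | sort_times
-- ===== SOURCE A (Python) =====
-- def sort_times(times):
--     hours = times.split()
--     am1group, am2group, pm1group, pm2group = [[] for _ in range(4)]
--
--     for h in hours:
--         if len(h) == 6:
--             if h[4] == 'a':
--                 am1group.append(h)
--             elif h[4] == 'p':
--                 pm1group.append(h)
--         elif len(h) == 7:
--             if h[5] == 'a':
--                 am2group.append(h)
--             elif h[5] == 'p':
--                 pm2group.append(h)
--
--     sorted_hours = sorted(am1group) + sorted(am2group) + sorted(pm1group) + sorted(pm2group)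
--     return ' '.join(sorted_hours)
-- ===== SOURCE B (Python) =====
-- def sort_times(times):
--     hours = [h for h in times.split() if len(h) in (6, 7) and h[-2] in 'ap']
--     return ' '.join(sorted(hours, key=lambda h: h[-2] + str(len(h)) + h))
-- ===== Notes on version B (the rewrite author's own statement) =====
-- stated objective: simpler
-- what changed: A's four explicit AM/PM bucket lists, four separate sorts and concatenation are replaced by one filter over the split tokens and a single sort under the composite key h[-2] + str(len(h)) + h, which reproduces the group order and the in-group lexicographic order.
import Mathlib
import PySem

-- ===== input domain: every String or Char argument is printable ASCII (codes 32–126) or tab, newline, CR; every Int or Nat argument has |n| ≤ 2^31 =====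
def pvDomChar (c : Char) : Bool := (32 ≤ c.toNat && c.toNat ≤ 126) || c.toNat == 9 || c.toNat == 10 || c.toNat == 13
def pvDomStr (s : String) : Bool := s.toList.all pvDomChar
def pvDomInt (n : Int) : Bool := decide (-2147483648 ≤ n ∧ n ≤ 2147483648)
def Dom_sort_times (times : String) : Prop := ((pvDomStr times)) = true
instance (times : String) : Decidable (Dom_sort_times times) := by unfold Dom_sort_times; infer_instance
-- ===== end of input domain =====

-- B replaces A's four explicit bucket lists with one filter and a single keyed sort (simpler decomposition).

-- ===== PORT A =====
def sort_times (times : String) : String :=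
  let hours := PySem.Str.split₀ times
  let g := hours.foldl (fun (g : List String × List String × List String × List String) h =>
    let (am1, am2, pm1, pm2) := g
    if PySem.Str.len h == 6 then
      if PySem.Str.pyGet? h 4 == some 'a' then (am1 ++ [h], am2, pm1, pm2)
      else if PySem.Str.pyGet? h 4 == some 'p' then (am1, am2, pm1 ++ [h], pm2)
      else (am1, am2, pm1, pm2)
    else if PySem.Str.len h == 7 then
      if PySem.Str.pyGet? h 5 == some 'a' then (am1, am2 ++ [h], pm1, pm2)
      else if PySem.Str.pyGet? h 5 == some 'p' then (am1, am2, pm1, pm2 ++ [h])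
      else (am1, am2, pm1, pm2)
    else (am1, am2, pm1, pm2)) ([], [], [], [])
  let sorted_hours :=
    PySem.List.sorted g.1 (fun x => x) false ++ PySem.List.sorted g.2.1 (fun x => x) false ++
    PySem.List.sorted g.2.2.1 (fun x => x) false ++ PySem.List.sorted g.2.2.2 (fun x => x) false
  PySem.Str.join " " sorted_hours

-- ===== PORT B =====
-- B's sort key h[-2] + str(len(h)) + h; on the filtered tokens h[-2] always exists (len ≥ 6),
-- so the Option.elim rendering of h[-2] is exact there.
def pvKeyB (h : String) : String :=
  String.ofList ((PySem.Str.pyGet? h (-2)).elim [] (fun c => [c]) ++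
                 (PySem.Int.toStr (PySem.Str.len h)).toList ++ h.toList)

def sort_times_alt (times : String) : String :=
  let hours := (PySem.Str.split₀ times).filter (fun h =>
    (PySem.Str.len h == 6 || PySem.Str.len h == 7) &&
    (PySem.Str.pyGet? h (-2) == some 'a' || PySem.Str.pyGet? h (-2) == some 'p'))
  PySem.Str.join " " (PySem.List.sorted hours pvKeyB false)

-- ===== PRECONDITION & SPEC =====
def Spec_sort_times (times : String) (out : String) : Prop := out = sort_times_alt times
instance (times : String) (out : String) : Decidable (Spec_sort_times times out) := by unfold Spec_sort_times; infer_instance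

-- ===== CLAIM (what is proved, stated in full; the proofs are below) =====
def Claim_equal_sort_times : Prop := ∀ (times : String), Dom_sort_times times → Spec_sort_times times (sort_times times)

-- ===== LEMMAS AND PROOFS =====

-- branch predicates of A's loop
def pvQ1 (h : String) : Bool := (PySem.Str.len h == 6) && (PySem.Str.pyGet? h 4 == some 'a')
def pvQ2 (h : String) : Bool := (PySem.Str.len h == 7) && (PySem.Str.pyGet? h 5 == some 'a')
def pvQ3 (h : String) : Bool := (PySem.Str.len h == 6) && !(PySem.Str.pyGet? h 4 == some 'a') && (PySem.Str.pyGet? h 4 == some 'p')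
def pvQ4 (h : String) : Bool := (PySem.Str.len h == 7) && !(PySem.Str.pyGet? h 5 == some 'a') && (PySem.Str.pyGet? h 5 == some 'p')
-- B's filter predicate
def pvQ (h : String) : Bool :=
  (PySem.Str.len h == 6 || PySem.Str.len h == 7) &&
  (PySem.Str.pyGet? h (-2) == some 'a' || PySem.Str.pyGet? h (-2) == some 'p')

-- A's loop builds exactly the four filtered sublists
lemma pv_fold_char (xs : List String) : ∀ (a1 a2 p1 p2 : List String),
    xs.foldl (fun (g : List String × List String × List String × List String) h =>
      let (am1, am2, pm1, pm2) := g
      if PySem.Str.len h == 6 then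
        if PySem.Str.pyGet? h 4 == some 'a' then (am1 ++ [h], am2, pm1, pm2)
        else if PySem.Str.pyGet? h 4 == some 'p' then (am1, am2, pm1 ++ [h], pm2)
        else (am1, am2, pm1, pm2)
      else if PySem.Str.len h == 7 then
        if PySem.Str.pyGet? h 5 == some 'a' then (am1, am2 ++ [h], pm1, pm2)
        else if PySem.Str.pyGet? h 5 == some 'p' then (am1, am2, pm1, pm2 ++ [h])
        else (am1, am2, pm1, pm2)
      else (am1, am2, pm1, pm2)) (a1, a2, p1, p2)
    = (a1 ++ xs.filter pvQ1, a2 ++ xs.filter pvQ2, p1 ++ xs.filter pvQ3, p2 ++ xs.filter pvQ4) := by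
  induction xs with
  | nil => simp
  | cons h t ih =>
    intro a1 a2 p1 p2
    cases h6 : (PySem.Str.len h == 6) with
    | true =>
      have h7 : (PySem.Str.len h == 7) = false := by
        simp only [beq_iff_eq, beq_eq_false_iff_ne] at h6 ⊢; omega
      cases ha4 : (PySem.Str.pyGet? h 4 == some 'a') with
      | true =>
        simp only [List.foldl_cons, h6, ha4, reduceIte]
        rw [ih]
        simp only [List.filter_cons, pvQ1, pvQ2, pvQ3, pvQ4, h6, h7, ha4, Bool.not_true,
          Bool.true_and, Bool.false_and, Bool.and_true, Bool.and_false, Bool.and_self,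
          reduceIte, Bool.false_eq_true]
        all_goals simp
      | false =>
        cases hp4 : (PySem.Str.pyGet? h 4 == some 'p') with
        | true =>
          simp only [List.foldl_cons, h6, ha4, hp4, reduceIte, Bool.false_eq_true]
          rw [ih]
          simp only [List.filter_cons, pvQ1, pvQ2, pvQ3, pvQ4, h6, h7, ha4, hp4, Bool.not_true,
            Bool.not_false, Bool.true_and, Bool.false_and, Bool.and_true, Bool.and_false,
            Bool.and_self, reduceIte, Bool.false_eq_true]
          all_goals simp
        | false =>
          simp only [List.foldl_cons, h6, ha4, hp4, reduceIte, Bool.false_eq_true]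
          rw [ih]
          simp only [List.filter_cons, pvQ1, pvQ2, pvQ3, pvQ4, h6, h7, ha4, hp4, Bool.not_true,
            Bool.not_false, Bool.true_and, Bool.false_and, Bool.and_true, Bool.and_false,
            Bool.and_self, reduceIte, Bool.false_eq_true]
          all_goals simp
    | false =>
      cases h7 : (PySem.Str.len h == 7) with
      | true =>
        cases ha5 : (PySem.Str.pyGet? h 5 == some 'a') with
        | true =>
          simp only [List.foldl_cons, h6, h7, ha5, reduceIte, Bool.false_eq_true]
          rw [ih]
          simp only [List.filter_cons, pvQ1, pvQ2, pvQ3, pvQ4, h6, h7, ha5, Bool.not_true,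
            Bool.true_and, Bool.false_and, Bool.and_true, Bool.and_false, Bool.and_self,
            reduceIte, Bool.false_eq_true]
          all_goals simp
        | false =>
          cases hp5 : (PySem.Str.pyGet? h 5 == some 'p') with
          | true =>
            simp only [List.foldl_cons, h6, h7, ha5, hp5, reduceIte, Bool.false_eq_true]
            rw [ih]
            simp only [List.filter_cons, pvQ1, pvQ2, pvQ3, pvQ4, h6, h7, ha5, hp5, Bool.not_true,
              Bool.not_false, Bool.true_and, Bool.false_and, Bool.and_true, Bool.and_false,
              Bool.and_self, reduceIte, Bool.false_eq_true]
            all_goals simp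
          | false =>
            simp only [List.foldl_cons, h6, h7, ha5, hp5, reduceIte, Bool.false_eq_true]
            rw [ih]
            simp only [List.filter_cons, pvQ1, pvQ2, pvQ3, pvQ4, h6, h7, ha5, hp5, Bool.not_true,
              Bool.not_false, Bool.true_and, Bool.false_and, Bool.and_true, Bool.and_false,
              Bool.and_self, reduceIte, Bool.false_eq_true]
            all_goals simp
      | false =>
        simp only [List.foldl_cons, h6, h7, reduceIte, Bool.false_eq_true]
        rw [ih]
        simp only [List.filter_cons, pvQ1, pvQ2, pvQ3, pvQ4, h6, h7, Bool.true_and,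
          Bool.false_and, Bool.and_true, Bool.and_false, Bool.and_self, reduceIte,
          Bool.false_eq_true]
        all_goals simp

-- s[-2] = s[len-2] once the length is known
lemma pv_get_neg2_of_len (h : String) (n k : Nat) (hn : n = k + 2)
    (hlen : PySem.Str.len h = (n : Int)) :
    PySem.Str.pyGet? h (-2) = PySem.Str.pyGet? h (k : Int) := by
  simp only [PySem.Str.pyGet?_eq, PySem.Str.len_eq] at *
  have hl : h.length = n := by
    have := @String.length_toList h
    omega
  simp [PySem.List.pyGet?, PySem.List.pyIdx?, hl, hn]

-- B's filter accepts exactly the tokens A's loop keeps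
lemma pv_Q_split (h : String) : pvQ h = (pvQ1 h || pvQ2 h || pvQ3 h || pvQ4 h) := by
  unfold pvQ pvQ1 pvQ2 pvQ3 pvQ4
  cases h6 : (PySem.Str.len h == 6) with
  | true =>
    have h7 : (PySem.Str.len h == 7) = false := by
      simp only [beq_iff_eq, beq_eq_false_iff_ne] at h6 ⊢; omega
    have hg : PySem.Str.pyGet? h (-2) = PySem.Str.pyGet? h 4 := by
      have := pv_get_neg2_of_len h 6 4 rfl (by exact_mod_cast beq_iff_eq.mp h6)
      exact_mod_cast this
    have hlen6 : ((h.length : Int)) = 6 := by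
      simp only [beq_iff_eq, PySem.Str.len_eq] at h6
      have := @String.length_toList h
      omega
    rw [hg]
    cases ha : (PySem.Str.pyGet? h 4 == some 'a') <;>
      cases hp : (PySem.Str.pyGet? h 4 == some 'p') <;> simp [h6, h7, ha, hp, hlen6]
  | false =>
    cases h7 : (PySem.Str.len h == 7) with
    | true =>
      have hg : PySem.Str.pyGet? h (-2) = PySem.Str.pyGet? h 5 := by
        have := pv_get_neg2_of_len h 7 5 rfl (by exact_mod_cast beq_iff_eq.mp h7)
        exact_mod_cast this
      have hlen7 : ((h.length : Int)) = 7 := by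
        simp only [beq_iff_eq, PySem.Str.len_eq] at h7
        have := @String.length_toList h
        omega
      rw [hg]
      cases ha : (PySem.Str.pyGet? h 5 == some 'a') <;>
        cases hp : (PySem.Str.pyGet? h 5 == some 'p') <;> simp [h6, h7, ha, hp, hlen7]
    | false => simp [h6, h7]

-- the four branch predicates are mutually exclusive, so the buckets concatenate to one filter
lemma pv_perm (xs : List String) :
    (xs.filter pvQ1 ++ xs.filter pvQ2 ++ xs.filter pvQ3 ++ xs.filter pvQ4).Perm (xs.filter pvQ) := by
  induction xs with
  | nil => simp
  | cons x t ih =>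
    have ih' : (t.filter pvQ1 ++ (t.filter pvQ2 ++ (t.filter pvQ3 ++ t.filter pvQ4))).Perm
        (t.filter pvQ) := by simpa [List.append_assoc] using ih
    simp only [List.filter_cons, pv_Q_split]
    cases h1 : pvQ1 x <;> cases h2 : pvQ2 x <;> cases h3 : pvQ3 x <;> cases h4 : pvQ4 x <;>
      first
      | (exfalso;
         simp only [pvQ1, pvQ2, pvQ3, pvQ4, Bool.and_eq_true, Bool.not_eq_true', beq_iff_eq,
           beq_eq_false_iff_ne] at h1 h2 h3 h4;
         first | omega | tauto)
      | (simp only [Bool.false_or, Bool.or_false, Bool.true_or, Bool.or_true, reduceIte,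
          Bool.false_eq_true, List.append_assoc, List.cons_append]
         first
         | exact ih'.cons x
         | exact List.perm_middle.trans (ih'.cons x)
         | exact ((List.Perm.append_left _ List.perm_middle).trans List.perm_middle).trans (ih'.cons x)
         | exact ((List.Perm.append_left _ ((List.Perm.append_left _ List.perm_middle).trans
             List.perm_middle)).trans List.perm_middle).trans (ih'.cons x)
         | exact ih')

-- the key's canonical shape on a kept token
lemma pv_key_eq (h : String) (c : Char) (n : Nat) (hlen : PySem.Str.len h = (n : Int))
    (hc : PySem.Str.pyGet? h (-2) = some c) :
    (pvKeyB h).toList = c :: ((PySem.Int.toStr (n : Int)).toList ++ h.toList) := by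
  simp only [PySem.Str.pyGet?_eq, PySem.Str.len_eq, PySem.Chars.pyGet?_eq_listPyGet?] at hc hlen
  have hl : h.length = n := by
    have := @String.length_toList h
    omega
  simp [pvKeyB, hc, hl]

lemma pv_key_q1 (h : String) (hq : pvQ1 h = true) : (pvKeyB h).toList = 'a' :: '6' :: h.toList := by
  simp only [pvQ1, Bool.and_eq_true, beq_iff_eq] at hq
  have hg := (pv_get_neg2_of_len h 6 4 rfl (by exact_mod_cast hq.1)).trans (by exact_mod_cast hq.2)
  simpa using pv_key_eq h 'a' 6 (by exact_mod_cast hq.1) hg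

lemma pv_key_q2 (h : String) (hq : pvQ2 h = true) : (pvKeyB h).toList = 'a' :: '7' :: h.toList := by
  simp only [pvQ2, Bool.and_eq_true, beq_iff_eq] at hq
  have hg := (pv_get_neg2_of_len h 7 5 rfl (by exact_mod_cast hq.1)).trans (by exact_mod_cast hq.2)
  simpa using pv_key_eq h 'a' 7 (by exact_mod_cast hq.1) hg

lemma pv_key_q3 (h : String) (hq : pvQ3 h = true) : (pvKeyB h).toList = 'p' :: '6' :: h.toList := by
  simp only [pvQ3, Bool.and_eq_true, beq_iff_eq] at hq
  have hg := (pv_get_neg2_of_len h 6 4 rfl (by exact_mod_cast hq.1.1)).trans (by exact_mod_cast hq.2)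
  simpa using pv_key_eq h 'p' 6 (by exact_mod_cast hq.1.1) hg

lemma pv_key_q4 (h : String) (hq : pvQ4 h = true) : (pvKeyB h).toList = 'p' :: '7' :: h.toList := by
  simp only [pvQ4, Bool.and_eq_true, beq_iff_eq] at hq
  have hg := (pv_get_neg2_of_len h 7 5 rfl (by exact_mod_cast hq.1.1)).trans (by exact_mod_cast hq.2)
  simpa using pv_key_eq h 'p' 7 (by exact_mod_cast hq.1.1) hg

-- ordering facts about keys of fixed shape
lemma pv_key_lt_same (a b : String) (c d : Char) (ka : (pvKeyB a).toList = c :: d :: a.toList)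
    (kb : (pvKeyB b).toList = c :: d :: b.toList) (hab : a < b) : pvKeyB a < pvKeyB b := by
  rw [String.lt_iff_toList_lt, ka, kb]
  exact List.Lex.cons (List.Lex.cons (String.lt_iff_toList_lt.mp hab))

lemma pv_key_le_same (a b : String) (c d : Char) (ka : (pvKeyB a).toList = c :: d :: a.toList)
    (kb : (pvKeyB b).toList = c :: d :: b.toList) (hab : a ≤ b) : pvKeyB a ≤ pvKeyB b := by
  rcases lt_or_eq_of_le hab with h | h
  · exact le_of_lt (pv_key_lt_same a b c d ka kb h)
  · subst h; exact le_refl _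

lemma pv_key_lt_fst (a b : String) (c c' d d' : Char) (ka : (pvKeyB a).toList = c :: d :: a.toList)
    (kb : (pvKeyB b).toList = c' :: d' :: b.toList) (hcc : c < c') : pvKeyB a < pvKeyB b := by
  rw [String.lt_iff_toList_lt, ka, kb]
  exact List.Lex.rel hcc

lemma pv_key_lt_snd (a b : String) (c d d' : Char) (ka : (pvKeyB a).toList = c :: d :: a.toList)
    (kb : (pvKeyB b).toList = c :: d' :: b.toList) (hdd : d < d') : pvKeyB a < pvKeyB b := by
  rw [String.lt_iff_toList_lt, ka, kb]
  exact List.Lex.cons (List.Lex.rel hdd)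

-- on kept tokens the key determines the token
lemma pv_key_inj (a b : String) (ha : pvQ a = true) (hb : pvQ b = true)
    (hk : pvKeyB a = pvKeyB b) : a = b := by
  have hk' := congrArg String.toList hk
  rw [pv_Q_split] at ha hb
  simp only [Bool.or_eq_true] at ha hb
  have hshape : ∀ x : String, ((pvQ1 x = true ∨ pvQ2 x = true) ∨ pvQ3 x = true) ∨ pvQ4 x = true →
      ∃ c d, (pvKeyB x).toList = c :: d :: x.toList := by
    rintro x (((hx | hx) | hx) | hx)
    · exact ⟨_, _, pv_key_q1 x hx⟩
    · exact ⟨_, _, pv_key_q2 x hx⟩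
    · exact ⟨_, _, pv_key_q3 x hx⟩
    · exact ⟨_, _, pv_key_q4 x hx⟩
  obtain ⟨ca, da, hka⟩ := hshape a ha
  obtain ⟨cb, db, hkb⟩ := hshape b hb
  rw [hka, hkb] at hk'
  have : a.toList = b.toList := by
    injection hk' with _ h2
    injection h2
  exact String.toList_inj.mp this

-- the concatenated A-side result is Pairwise-sorted under B's key
lemma pv_lhs_pairwise (xs : List String) :
    (PySem.List.sorted (xs.filter pvQ1) (fun x => x) false ++
     PySem.List.sorted (xs.filter pvQ2) (fun x => x) false ++
     PySem.List.sorted (xs.filter pvQ3) (fun x => x) false ++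
     PySem.List.sorted (xs.filter pvQ4) (fun x => x) false).Pairwise
      (fun a b => pvKeyB a ≤ pvKeyB b) := by
  have mem1 : ∀ a ∈ PySem.List.sorted (xs.filter pvQ1) (fun x => x) false, pvQ1 a = true := by
    intro a ha; exact (List.mem_filter.mp ((PySem.List.mem_sorted _ _ _ _).mp ha)).2
  have mem2 : ∀ a ∈ PySem.List.sorted (xs.filter pvQ2) (fun x => x) false, pvQ2 a = true := by
    intro a ha; exact (List.mem_filter.mp ((PySem.List.mem_sorted _ _ _ _).mp ha)).2
  have mem3 : ∀ a ∈ PySem.List.sorted (xs.filter pvQ3) (fun x => x) false, pvQ3 a = true := by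
    intro a ha; exact (List.mem_filter.mp ((PySem.List.mem_sorted _ _ _ _).mp ha)).2
  have mem4 : ∀ a ∈ PySem.List.sorted (xs.filter pvQ4) (fun x => x) false, pvQ4 a = true := by
    intro a ha; exact (List.mem_filter.mp ((PySem.List.mem_sorted _ _ _ _).mp ha)).2
  have pw1 : (PySem.List.sorted (xs.filter pvQ1) (fun x => x) false).Pairwise
      (fun a b => pvKeyB a ≤ pvKeyB b) := by
    refine (PySem.List.sorted_pairwise _ _).imp_of_mem ?_
    intro a b ha hb hle
    exact pv_key_le_same a b 'a' '6' (pv_key_q1 a (mem1 a ha)) (pv_key_q1 b (mem1 b hb)) hle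
  have pw2 : (PySem.List.sorted (xs.filter pvQ2) (fun x => x) false).Pairwise
      (fun a b => pvKeyB a ≤ pvKeyB b) := by
    refine (PySem.List.sorted_pairwise _ _).imp_of_mem ?_
    intro a b ha hb hle
    exact pv_key_le_same a b 'a' '7' (pv_key_q2 a (mem2 a ha)) (pv_key_q2 b (mem2 b hb)) hle
  have pw3 : (PySem.List.sorted (xs.filter pvQ3) (fun x => x) false).Pairwise
      (fun a b => pvKeyB a ≤ pvKeyB b) := by
    refine (PySem.List.sorted_pairwise _ _).imp_of_mem ?_
    intro a b ha hb hle
    exact pv_key_le_same a b 'p' '6' (pv_key_q3 a (mem3 a ha)) (pv_key_q3 b (mem3 b hb)) hle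
  have pw4 : (PySem.List.sorted (xs.filter pvQ4) (fun x => x) false).Pairwise
      (fun a b => pvKeyB a ≤ pvKeyB b) := by
    refine (PySem.List.sorted_pairwise _ _).imp_of_mem ?_
    intro a b ha hb hle
    exact pv_key_le_same a b 'p' '7' (pv_key_q4 a (mem4 a ha)) (pv_key_q4 b (mem4 b hb)) hle
  rw [List.append_assoc, List.append_assoc]
  rw [List.pairwise_append]
  refine ⟨pw1, ?_, ?_⟩
  · rw [List.pairwise_append]
    refine ⟨pw2, ?_, ?_⟩
    · rw [List.pairwise_append]
      refine ⟨pw3, pw4, ?_⟩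
      intro a ha b hb
      exact le_of_lt (pv_key_lt_snd a b 'p' '6' '7' (pv_key_q3 a (mem3 a ha))
        (pv_key_q4 b (mem4 b hb)) (by decide))
    · intro a ha b hb
      rcases List.mem_append.mp hb with hb | hb
      · exact le_of_lt (pv_key_lt_fst a b 'a' 'p' '7' '6' (pv_key_q2 a (mem2 a ha))
          (pv_key_q3 b (mem3 b hb)) (by decide))
      · exact le_of_lt (pv_key_lt_fst a b 'a' 'p' '7' '7' (pv_key_q2 a (mem2 a ha))
          (pv_key_q4 b (mem4 b hb)) (by decide))
  · intro a ha b hb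
    have hka := pv_key_q1 a (mem1 a ha)
    rcases List.mem_append.mp hb with hb | hb
    · exact le_of_lt (pv_key_lt_snd a b 'a' '6' '7' hka (pv_key_q2 b (mem2 b hb)) (by decide))
    · rcases List.mem_append.mp hb with hb | hb
      · exact le_of_lt (pv_key_lt_fst a b 'a' 'p' '6' '6' hka (pv_key_q3 b (mem3 b hb)) (by decide))
      · exact le_of_lt (pv_key_lt_fst a b 'a' 'p' '6' '7' hka (pv_key_q4 b (mem4 b hb)) (by decide))

-- main identity: A's four sorted buckets concatenate to B's single keyed sort
lemma pv_main (xs : List String) :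
    PySem.List.sorted (xs.filter pvQ1) (fun x => x) false ++
    PySem.List.sorted (xs.filter pvQ2) (fun x => x) false ++
    PySem.List.sorted (xs.filter pvQ3) (fun x => x) false ++
    PySem.List.sorted (xs.filter pvQ4) (fun x => x) false
    = PySem.List.sorted (xs.filter pvQ) pvKeyB false := by
  have hperm : (PySem.List.sorted (xs.filter pvQ1) (fun x => x) false ++
      PySem.List.sorted (xs.filter pvQ2) (fun x => x) false ++
      PySem.List.sorted (xs.filter pvQ3) (fun x => x) false ++
      PySem.List.sorted (xs.filter pvQ4) (fun x => x) false).Perm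
      (PySem.List.sorted (xs.filter pvQ) pvKeyB false) := by
    refine List.Perm.trans ?_ (PySem.List.sorted_perm _ _ _).symm
    refine List.Perm.trans ?_ (pv_perm xs)
    exact ((((PySem.List.sorted_perm _ _ _).append (PySem.List.sorted_perm _ _ _)).append
      (PySem.List.sorted_perm _ _ _)).append (PySem.List.sorted_perm _ _ _))
  have hmemL : ∀ a, a ∈ (PySem.List.sorted (xs.filter pvQ1) (fun x => x) false ++
      PySem.List.sorted (xs.filter pvQ2) (fun x => x) false ++
      PySem.List.sorted (xs.filter pvQ3) (fun x => x) false ++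
      PySem.List.sorted (xs.filter pvQ4) (fun x => x) false) → pvQ a = true := by
    intro a ha
    rw [pv_Q_split]
    simp only [List.mem_append, PySem.List.mem_sorted, List.mem_filter] at ha
    rcases ha with ((ha | ha) | ha) | ha <;> simp [ha.2]
  refine List.Perm.eq_of_pairwise ?_ (pv_lhs_pairwise xs) (PySem.List.sorted_pairwise _ _) hperm
  intro a b ha hb hab hba
  refine pv_key_inj a b (hmemL a ha) ?_ (le_antisymm hab hba)
  exact (List.mem_filter.mp ((PySem.List.mem_sorted _ _ _ _).mp hb)).2

-- ===== VERDICT (by name: the statement is the Claim_ definition above) =====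
theorem sort_times_spec : Claim_equal_sort_times := by
  intro times _
  show sort_times times = sort_times_alt times
  unfold sort_times sort_times_alt
  simp only [pv_fold_char, List.nil_append]
  rw [show ((fun h => (PySem.Str.len h == 6 || PySem.Str.len h == 7) &&
    (PySem.Str.pyGet? h (-2) == some 'a' || PySem.Str.pyGet? h (-2) == some 'p'))) = pvQ from rfl,
    ← pv_main]
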